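-- pv_equiv track=rewrite | github.com/leo-bro/TIL | python/programmers/rank.py | solution
-- ===== SOURCE A (Python) =====
-- def solution(rank, attendance):
--     answer = 0
--     arr = [(i, (r, a)) for i, (r, a) in enumerate(zip(rank, attendance))]
--
--     # Filter elements where a is True and sort by r in ascending order
--     filtered_sorted_arr = sorted([x for x in arr if x[1][1]], key=lambda x: x[1][0])
--
--     # Extract the indices of the top 3 elements
--     if len(filtered_sorted_arr) >= 3:
--         a, b, c = (
--             filtered_sorted_arr[0][0],
--             filtered_sorted_arr[1][0],
--             filtered_sorted_arr[2][0],
--         )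
--         answer = 10000 * a + 100 * b + c
--     return answer
-- ===== SOURCE B (Python) =====
-- def solution(rank, attendance):
--     # track the three best (rank, index) pairs in three registers, no sort
--     b1 = b2 = b3 = None
--     for i, (r, a) in enumerate(zip(rank, attendance)):
--         if not a:
--             continue
--         if b1 is None or r < b1[0]:
--             b1, b2, b3 = (r, i), b1, b2
--         elif b2 is None or r < b2[0]:
--             b2, b3 = (r, i), b2
--         elif b3 is None or r < b3[0]:
--             b3 = (r, i)
--     if b3 is None:
--         return 0
--     return 10000 * b1[1] + 100 * b2[1] + b3[1]
-- ===== Notes on version B (the rewrite author's own statement) =====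
-- stated objective: faster
-- what changed: Replaces A's build-filter-then-full-sort with a single pass that tracks the three best (rank, index) pairs in three fixed registers (b1,b2,b3) with shift-down updates, no list of candidates and no sort.
import Mathlib
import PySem

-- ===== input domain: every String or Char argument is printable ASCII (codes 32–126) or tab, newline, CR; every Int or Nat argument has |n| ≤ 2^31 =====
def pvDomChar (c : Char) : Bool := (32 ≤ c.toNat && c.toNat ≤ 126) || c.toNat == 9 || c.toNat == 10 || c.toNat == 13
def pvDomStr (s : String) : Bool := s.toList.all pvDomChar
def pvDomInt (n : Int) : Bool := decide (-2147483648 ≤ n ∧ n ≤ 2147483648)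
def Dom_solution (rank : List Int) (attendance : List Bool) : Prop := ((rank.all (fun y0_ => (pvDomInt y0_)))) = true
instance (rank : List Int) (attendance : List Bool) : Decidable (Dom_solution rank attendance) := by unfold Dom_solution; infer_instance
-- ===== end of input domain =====

-- B replaces A's filter-then-full-sort by a single pass holding the three best (rank, index)
-- pairs in three fixed registers with shift-down updates; same return value, no sort.

-- ===== PORT A =====
def solution (rank : List Int) (attendance : List Bool) : Int :=
  let fs := PySem.List.sorted
      ((PySem.List.enumerate (rank.zip attendance)).filter (fun x => x.2.2))
      (fun x => x.2.1)
  if 3 ≤ fs.length then 10000 * (fs[0]!).1 + 100 * (fs[1]!).1 + (fs[2]!).1 else 0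

-- ===== PORT B =====
-- one loop-body step of Source B: the if/elif chain on the three registers (guard `if not a: continue` included)
def pvRegCore (s : Option (Int × Int) × Option (Int × Int) × Option (Int × Int))
    (x : Int × (Int × Bool)) :
    Option (Int × Int) × Option (Int × Int) × Option (Int × Int) :=
  match s with
  | (b1, b2, b3) =>
    if (match b1 with | none => true | some p => decide (x.2.1 < p.1)) then
      (some (x.2.1, x.1), b1, b2)
    else if (match b2 with | none => true | some p => decide (x.2.1 < p.1)) then
      (b1, some (x.2.1, x.1), b2)
    else if (match b3 with | none => true | some p => decide (x.2.1 < p.1)) then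
      (b1, b2, some (x.2.1, x.1))
    else (b1, b2, b3)

def solution_alt (rank : List Int) (attendance : List Bool) : Int :=
  let s := (PySem.List.enumerate (rank.zip attendance)).foldl
    (fun s x => if x.2.2 then pvRegCore s x else s) (none, none, none)
  -- Source B: `if b3 is None: return 0`; b3 filled with b1/b2 empty is unreachable (registers fill in order),
  -- so the catch-all branch only ever fires when b3 is none
  match s with
  | (some p1, some p2, some p3) => 10000 * p1.2 + 100 * p2.2 + p3.2
  | _ => 0

-- ===== PRECONDITION & SPEC =====
def Spec_solution (rank : List Int) (attendance : List Bool) (out : Int) : Prop := out = solution_alt rank attendance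
instance (rank : List Int) (attendance : List Bool) (out : Int) : Decidable (Spec_solution rank attendance out) := by unfold Spec_solution; infer_instance

-- ===== CLAIM (what is proved, stated in full; the proofs are below) =====
def Claim_equal_solution : Prop := ∀ (rank : List Int) (attendance : List Bool), Dom_solution rank attendance → Spec_solution rank attendance (solution rank attendance)

-- ===== LEMMAS AND PROOFS =====

-- the projection B keeps of A's (index, (rank, att)) entries
def pvProj (x : Int × (Int × Bool)) : Int × Int := (x.2.1, x.1)

-- the register triple determined by the first three entries of a list
def pvToRegs : List (Int × Int) → Option (Int × Int) × Option (Int × Int) × Option (Int × Int)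
  | [] => (none, none, none)
  | [a] => (some a, none, none)
  | [a, b] => (some a, some b, none)
  | a :: b :: c :: _ => (some a, some b, some c)

-- one register step = insertion into the sorted list, viewed through pvToRegs
theorem regCore_toRegs (x : Int × (Int × Bool)) (m : List (Int × Int)) :
    pvRegCore (pvToRegs m) x
      = pvToRegs (PySem.List.insertBy (fun p q : Int × Int => decide (p.1 < q.1)) (x.2.1, x.1) m) := by
  rcases m with _ | ⟨a, _ | ⟨b, _ | ⟨c, t⟩⟩⟩ <;>
    simp only [pvRegCore, pvToRegs, PySem.List.insertBy] <;>
    split_ifs <;> simp_all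

-- B's comparison on projected pairs agrees with A's key comparison
theorem map_insertBy (x : Int × (Int × Bool)) (l : List (Int × (Int × Bool))) :
    (PySem.List.insertBy (fun a b => decide (a.2.1 < b.2.1)) x l).map pvProj
      = PySem.List.insertBy (fun p q : Int × Int => decide (p.1 < q.1)) (x.2.1, x.1) (l.map pvProj) := by
  induction l with
  | nil => simp [PySem.List.insertBy, pvProj]
  | cons y ys ih =>
    simp only [PySem.List.insertBy, List.map_cons]
    by_cases h : x.2.1 < y.2.1
    · simp [h, pvProj]
    · simp [h, pvProj, ih]

-- loop invariant: B's register triple is pvToRegs of the projection of A's insertion-sort state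
theorem fold_invariant (l acc : List (Int × (Int × Bool))) :
    l.foldl pvRegCore (pvToRegs (acc.map pvProj))
    = pvToRegs ((l.foldl (fun acc x =>
          PySem.List.insertBy (fun a b => decide (a.2.1 < b.2.1)) x acc) acc).map pvProj) := by
  induction l generalizing acc with
  | nil => rfl
  | cons x xs ih =>
    simp only [List.foldl_cons]
    rw [regCore_toRegs, ← map_insertBy, ih]

-- reading the answer from the first three entries equals reading it from the registers
theorem final_match (S : List (Int × (Int × Bool))) :
    (if 3 ≤ S.length then 10000 * (S[0]!).1 + 100 * (S[1]!).1 + (S[2]!).1 else (0 : Int))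
    = (match pvToRegs (S.map pvProj) with
      | (some p1, some p2, some p3) => 10000 * p1.2 + 100 * p2.2 + p3.2
      | _ => (0 : Int)) := by
  rcases S with _ | ⟨a, _ | ⟨b, _ | ⟨c, t⟩⟩⟩ <;>
    simp [pvToRegs, pvProj]

theorem solution_eq (rank : List Int) (attendance : List Bool) :
    solution rank attendance = solution_alt rank attendance := by
  unfold solution solution_alt
  simp only []
  rw [PySem.List.sorted_eq_foldl_insertBy,
    PySem.List.foldl_if_eq_foldl_filter (p := fun x : Int × (Int × Bool) => x.2.2)
      (f := pvRegCore),
    show ((none, none, none) : Option (Int × Int) × Option (Int × Int) × Option (Int × Int))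
      = pvToRegs (([] : List (Int × (Int × Bool))).map pvProj) from rfl,
    fold_invariant]
  exact final_match _

-- ===== VERDICT (by name: the statement is the Claim_ definition above) =====
theorem solution_spec : Claim_equal_solution := by
  intro rank attendance _
  unfold Spec_solution
  exact solution_eq rank attendance
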